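-- pv_equiv track=rewrite | github.com/Lee-sungheon/TIL | coding_test/beakjoon.py | aaaa
-- ===== SOURCE A (Python) =====
-- def aaaa(C, hotels, i, min_costs):
--     P = C // hotels[i][2]
--     total = P * hotels[i][2]
--     cost = P * hotels[i][1]
--     C -= total
--     min_costs.append(cost+ hotels[i][1])
--     i = i + 1
--
--     if i == len(hotels) - 1:
--         return min_costs
--
--     return aaaa(C, hotels, i, min_costs)
-- ===== SOURCE B (Python) =====
-- def aaaa(C, hotels, i, min_costs):
--     n = len(hotels)
--     while i != n - 1:
--         p, d = hotels[i][1], hotels[i][2]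
--         min_costs.append((C // d) * p + p)
--         C %= d
--         i += 1
--     return min_costs
-- ===== Notes on version B (the rewrite author's own statement) =====
-- stated objective: idiomatic
-- what changed: The tail recursion becomes an explicit while-loop with a pre-test (i != len(hotels)-1), and the budget update C -= (C//d)*d is folded into C %= d; same per-step arithmetic, different decomposition.
import Mathlib
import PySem

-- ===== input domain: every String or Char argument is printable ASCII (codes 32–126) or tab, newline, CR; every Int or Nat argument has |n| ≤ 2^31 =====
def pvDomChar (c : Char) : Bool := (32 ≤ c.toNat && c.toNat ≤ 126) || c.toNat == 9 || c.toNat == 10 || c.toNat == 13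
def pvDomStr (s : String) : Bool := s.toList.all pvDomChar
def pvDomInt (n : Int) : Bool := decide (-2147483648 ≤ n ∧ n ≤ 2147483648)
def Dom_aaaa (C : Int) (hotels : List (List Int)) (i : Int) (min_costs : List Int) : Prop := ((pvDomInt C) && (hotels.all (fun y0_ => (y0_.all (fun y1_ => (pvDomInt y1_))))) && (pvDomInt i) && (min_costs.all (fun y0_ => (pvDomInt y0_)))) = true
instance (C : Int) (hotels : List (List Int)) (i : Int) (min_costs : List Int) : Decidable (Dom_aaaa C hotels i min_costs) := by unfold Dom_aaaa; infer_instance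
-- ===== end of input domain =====

-- B rewrites A's tail recursion as a while-loop with a pre-test and folds C -= (C//d)*d into C %= d;
-- idiomatic, same cost. In Python both mutate min_costs in place (the same appends inside Pre_);
-- the theorems here are about the return value.

-- ===== PORT A =====
-- fuel is only a totality guard: 2*len(hotels)+1 exceeds the number of recursive calls
-- on every input where Python returns (the 0-fuel arm is never reached there)
def aaaaGo (fuel : Nat) (C : Int) (hotels : List (List Int)) (i : Int) (min_costs : List Int) : List Int :=
  match fuel with
  | 0 => min_costs
  | fuel + 1 =>
    match PySem.List.pyGet? hotels i with
    | none => min_costs                    -- Python raises IndexError here (outside Pre_)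
    | some row =>
      match PySem.List.pyGet? row 2, PySem.List.pyGet? row 1 with
      | some d, some p =>
        if d = 0 then min_costs            -- ZeroDivisionError (outside Pre_)
        else
          let P := PySem.Int.floordiv C d
          let total := P * d
          let cost := P * p
          let C2 := C - total
          let mc := min_costs ++ [cost + p]
          let i2 := i + 1
          if i2 = (hotels.length : Int) - 1 then mc
          else aaaaGo fuel C2 hotels i2 mc
      | _, _ => min_costs                  -- IndexError on the row (outside Pre_)

def aaaa (C : Int) (hotels : List (List Int)) (i : Int) (min_costs : List Int) : List Int :=
  aaaaGo (2 * hotels.length + 1) C hotels i min_costs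

-- ===== PORT B =====
-- while i != n - 1: process row i; return min_costs  (same fuel-style totality guard)
def aaaaAltGo (fuel : Nat) (hotels : List (List Int)) (C : Int) (i : Int) (acc : List Int) : List Int :=
  match fuel with
  | 0 => acc
  | fuel + 1 =>
    if i = (hotels.length : Int) - 1 then acc
    else
      match PySem.List.pyGet? hotels i with
      | none => acc                        -- Python raises IndexError here (outside Pre_)
      | some row =>
        match PySem.List.pyGet? row 1, PySem.List.pyGet? row 2 with
        | some p, some d =>
          if d = 0 then acc                -- ZeroDivisionError (outside Pre_)
          else aaaaAltGo fuel hotels (PySem.Int.mod C d) (i + 1)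
                 (acc ++ [PySem.Int.floordiv C d * p + p])
        | _, _ => acc                      -- IndexError on the row (outside Pre_)

def aaaa_alt (C : Int) (hotels : List (List Int)) (i : Int) (min_costs : List Int) : List Int :=
  aaaaAltGo (2 * hotels.length + 1) hotels C i min_costs

-- ===== PRECONDITION & SPEC =====
-- row j (Python wraparound index) exists, has at least 3 entries and a nonzero nightly-count entry
def rowOK (hotels : List (List Int)) (j : Int) : Bool :=
  match PySem.List.pyGet? hotels j with
  | none => false
  | some row => decide (3 ≤ row.length) && decide (PySem.List.pyGet? row 2 ≠ some 0)

-- exactly the inputs on which the Python A returns: a valid start index i ∈ [-n, n-2]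
-- and every row visited (indices i .. n-2, negative ones wrapping) is well-formed
def Pre_aaaa (C : Int) (hotels : List (List Int)) (i : Int) (min_costs : List Int) : Prop :=
  hotels ≠ [] ∧ -(hotels.length : Int) ≤ i ∧ i ≤ (hotels.length : Int) - 2 ∧
  ∀ j ∈ PySem.List.pyRange i ((hotels.length : Int) - 1), rowOK hotels j = true
instance (C : Int) (hotels : List (List Int)) (i : Int) (min_costs : List Int) : Decidable (Pre_aaaa C hotels i min_costs) := by unfold Pre_aaaa; infer_instance

def pvWitness_aaaa : Int × List (List Int) × Int × List Int := (10, [[0, 2, 3], [0, 0, 0]], 0, [])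

def Spec_aaaa (C : Int) (hotels : List (List Int)) (i : Int) (min_costs : List Int) (out : List Int) : Prop := out = aaaa_alt C hotels i min_costs
instance (C : Int) (hotels : List (List Int)) (i : Int) (min_costs : List Int) (out : List Int) : Decidable (Spec_aaaa C hotels i min_costs out) := by unfold Spec_aaaa; infer_instance

-- ===== CLAIM (what is proved, stated in full; the proofs are below) =====
def Claim_equal_aaaa : Prop := ∀ (C : Int) (hotels : List (List Int)) (i : Int) (min_costs : List Int), Dom_aaaa C hotels i min_costs → Pre_aaaa C hotels i min_costs → Spec_aaaa C hotels i min_costs (aaaa C hotels i min_costs)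
-- ===== LEMMAS AND PROOFS =====

lemma aaaaGo_eq (fuel : Nat) (C : Int) (hotels : List (List Int)) (i : Int) (acc : List Int)
    (row : List Int) (d p : Int) (hg : PySem.List.pyGet? hotels i = some row)
    (h2 : PySem.List.pyGet? row 2 = some d) (h1 : PySem.List.pyGet? row 1 = some p)
    (hd : d ≠ 0) :
    aaaaGo (fuel + 1) C hotels i acc =
      if i + 1 = (hotels.length : Int) - 1 then acc ++ [PySem.Int.floordiv C d * p + p]
      else aaaaGo fuel (C - PySem.Int.floordiv C d * d) hotels (i + 1)
             (acc ++ [PySem.Int.floordiv C d * p + p]) := by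
  rw [aaaaGo, hg]
  simp only [h2, h1]
  rw [if_neg hd]

lemma aaaaAltGo_eq (fuel : Nat) (C : Int) (hotels : List (List Int)) (i : Int) (acc : List Int)
    (row : List Int) (d p : Int) (hne : i ≠ (hotels.length : Int) - 1)
    (hg : PySem.List.pyGet? hotels i = some row)
    (h2 : PySem.List.pyGet? row 2 = some d) (h1 : PySem.List.pyGet? row 1 = some p)
    (hd : d ≠ 0) :
    aaaaAltGo (fuel + 1) hotels C i acc =
      aaaaAltGo fuel hotels (PySem.Int.mod C d) (i + 1)
        (acc ++ [PySem.Int.floordiv C d * p + p]) := by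
  rw [aaaaAltGo, if_neg hne, hg]
  simp only [h1, h2]
  rw [if_neg hd]

lemma rowOK_elim (hotels : List (List Int)) (i : Int) (hR : rowOK hotels i = true) :
    ∃ row d p, PySem.List.pyGet? hotels i = some row ∧
      PySem.List.pyGet? row 2 = some d ∧ PySem.List.pyGet? row 1 = some p ∧ d ≠ 0 := by
  unfold rowOK at hR
  cases hg : PySem.List.pyGet? hotels i with
  | none => rw [hg] at hR; simp at hR
  | some row =>
    rw [hg] at hR
    simp only [Bool.and_eq_true, decide_eq_true_eq] at hR
    obtain ⟨hlen, hnz⟩ := hR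
    have h2 : PySem.List.pyGet? row 2 = some (row[(2:Int).toNat]) :=
      PySem.List.pyGet?_eq_some_getElem row (by norm_num) (by omega)
    have h1 : PySem.List.pyGet? row 1 = some (row[(1:Int).toNat]) :=
      PySem.List.pyGet?_eq_some_getElem row (by norm_num) (by omega)
    refine ⟨row, _, _, rfl, h2, h1, ?_⟩
    intro h0
    rw [h0] at h2
    exact hnz h2

lemma aaaa_key (hotels : List (List Int)) (k : ℕ) :
    ∀ (C i : Int) (acc : List Int) (fuel : Nat),
      i ≤ (hotels.length : Int) - 2 → -(hotels.length : Int) ≤ i →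
      ((hotels.length : Int) - 2 - i).toNat = k → k + 2 ≤ fuel →
      (∀ j, i ≤ j → j ≤ (hotels.length : Int) - 2 → rowOK hotels j = true) →
      aaaaGo fuel C hotels i acc = aaaaAltGo fuel hotels C i acc := by
  induction k with
  | zero =>
    intro C i acc fuel hhi hlo hk hfuel hrow
    obtain ⟨f, rfl⟩ : ∃ f, fuel = f + 1 := ⟨fuel - 1, by omega⟩
    obtain ⟨f', rfl⟩ : ∃ f', f = f' + 1 := ⟨f - 1, by omega⟩
    obtain ⟨row, d, p, hg, h2, h1, hd⟩ := rowOK_elim hotels i (hrow i le_rfl hhi)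
    rw [aaaaGo_eq _ C hotels i acc row d p hg h2 h1 hd,
        aaaaAltGo_eq _ C hotels i acc row d p (by omega) hg h2 h1 hd,
        if_pos (by omega : i + 1 = (hotels.length : Int) - 1),
        aaaaAltGo, if_pos (by omega : i + 1 = (hotels.length : Int) - 1)]
  | succ k ih =>
    intro C i acc fuel hhi hlo hk hfuel hrow
    obtain ⟨f, rfl⟩ : ∃ f, fuel = f + 1 := ⟨fuel - 1, by omega⟩
    obtain ⟨row, d, p, hg, h2, h1, hd⟩ := rowOK_elim hotels i (hrow i le_rfl hhi)
    rw [aaaaGo_eq _ C hotels i acc row d p hg h2 h1 hd,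
        aaaaAltGo_eq _ C hotels i acc row d p (by omega) hg h2 h1 hd,
        if_neg (by omega : ¬ i + 1 = (hotels.length : Int) - 1)]
    have hmod : PySem.Int.mod C d = C - PySem.Int.floordiv C d * d := by
      have := PySem.Int.floordiv_mul_add_mod C d; linarith
    rw [← hmod]
    exact ih (PySem.Int.mod C d) (i + 1) (acc ++ [PySem.Int.floordiv C d * p + p]) f
      (by omega) (by omega) (by omega) (by omega)
      (fun j hj1 hj2 => hrow j (by omega) hj2)

-- ===== VERDICT (by name: the statement is the Claim_ definition above) =====
theorem aaaa_spec : Claim_equal_aaaa := by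
  intro C hotels i mc _ hpre
  obtain ⟨hne, hlo, hhi, hrows⟩ := hpre
  unfold Spec_aaaa aaaa_alt aaaa
  refine aaaa_key hotels (((hotels.length : Int) - 2 - i).toNat) C i mc _ hhi hlo rfl
    (by omega) ?_
  intro j h1 h2
  exact hrows j (by rw [PySem.List.mem_pyRange_one]; omega)
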